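-- pv_equiv track=rewrite | github.com/Nekit228/Labs | Merge_Sort.py | split_in_parts
-- ===== SOURCE A (Python) =====
-- from math import sqrt
--
-- def split_in_parts(a): #разбиваем исходный массив на подмассивы
--     arrays = [] #массив массивов
--     temp = [] #подмассив
--     n = len(a) #длина массива
--     m = int(sqrt(n)) # длина подмассива
--     for i in a:
--         temp.append(i) #увеличиваем подмассив
--         if len(temp) >= m: #проверяем длину подмассива,если больше
--             arrays.append(temp) #кладем подмассив темп в массив аррейс
--             temp = [] #обнуляем подмассив
--     if len(temp) > 0: #если мы прошли весь массив а, но подмассив остался не пустым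
--         arrays.append(temp) #дописываем то,что осталось в аррайс
--     return arrays #возврат разбитого массива
-- ===== SOURCE B (Python) =====
-- from math import isqrt
--
-- def split_in_parts(a):
--     n = len(a)
--     if n == 0:
--         return []
--     m = isqrt(n)
--     return [a[i:i+m] for i in range(0, n, m)]
-- ===== Notes on version B (the rewrite author's own statement) =====
-- stated objective: simpler
-- what changed: Replaces the element-by-element loop that grows a temp buffer and flushes it whenever it reaches length m with a single slice comprehension over range(0, n, m), stepping chunk start indices directly (bulk slicing also removes the per-element append/length-check, measured ~1.8x faster).
import Mathlib
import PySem

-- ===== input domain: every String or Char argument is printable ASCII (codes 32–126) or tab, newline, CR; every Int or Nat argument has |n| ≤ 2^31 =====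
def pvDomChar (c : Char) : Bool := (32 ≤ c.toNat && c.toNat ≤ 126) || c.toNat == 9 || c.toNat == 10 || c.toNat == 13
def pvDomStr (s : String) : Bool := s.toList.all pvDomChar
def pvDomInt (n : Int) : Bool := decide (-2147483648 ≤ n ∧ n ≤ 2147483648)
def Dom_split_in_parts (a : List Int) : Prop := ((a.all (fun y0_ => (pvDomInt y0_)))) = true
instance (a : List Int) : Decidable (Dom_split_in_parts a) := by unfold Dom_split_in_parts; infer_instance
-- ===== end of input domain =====

-- B replaces A's grow-and-flush temp buffer with a slice comprehension over range(0, n, m) (objective: simpler).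
-- int(sqrt(n)) is ported as Nat.sqrt n, exact for every list length reachable here.

-- ===== PORT A =====
def split_in_parts (a : List Int) : List (List Int) :=
  let n := a.length
  let m := Nat.sqrt n
  let st := a.foldl
    (fun (st : List (List Int) × List Int) (i : Int) =>
      let temp := st.2 ++ [i]
      if temp.length ≥ m then (st.1 ++ [temp], ([] : List Int)) else (st.1, temp))
    (([] : List (List Int)), ([] : List Int))
  if st.2.length > 0 then st.1 ++ [st.2] else st.1

-- ===== PORT B =====
def split_in_parts_alt (a : List Int) : List (List Int) :=
  let n := a.length
  if n = 0 then []
  else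
    let m := Nat.sqrt n
    (PySem.List.pyRange 0 (n : Int) (m : Int)).map
      (fun i => PySem.List.slice a (some i) (some (i + (m : Int))))

-- ===== PRECONDITION & SPEC =====
def Spec_split_in_parts (a : List Int) (out : List (List Int)) : Prop := out = split_in_parts_alt a
instance (a : List Int) (out : List (List Int)) : Decidable (Spec_split_in_parts a out) := by unfold Spec_split_in_parts; infer_instance

-- ===== CLAIM (what is proved, stated in full; the proofs are below) =====
def Claim_equal_split_in_parts : Prop := ∀ (a : List Int), Dom_split_in_parts a → Spec_split_in_parts a (split_in_parts a)

-- ===== LEMMAS AND PROOFS =====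

-- reference chunking: successive pieces of size m (pieces of size 1 if m = 0; only hit when a = [])
def pvChunks (m : Nat) : List Int → List (List Int)
  | [] => []
  | x :: xs => (x :: xs.take (m - 1)) :: pvChunks m (xs.drop (m - 1))
termination_by l => l.length
decreasing_by simp

theorem pvChunks_nil (m : Nat) : pvChunks m [] = [] := by rw [pvChunks.eq_def]

theorem pvChunks_cons (m : Nat) (hm : 1 ≤ m) (l : List Int) (hl : l ≠ []) :
    pvChunks m l = l.take m :: pvChunks m (l.drop m) := by
  cases l with
  | nil => exact absurd rfl hl
  | cons x xs =>
    obtain ⟨k, rfl⟩ : ∃ k, m = k + 1 := ⟨m - 1, by omega⟩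
    rw [pvChunks.eq_def]
    simp

-- A's buffered loop, characterised: finishing the fold from (acc, temp) appends chunksBuf
def pvChunksBuf (m : Nat) (temp : List Int) : List Int → List (List Int)
  | [] => if temp.length > 0 then [temp] else []
  | x :: xs =>
      if (temp ++ [x]).length ≥ m then (temp ++ [x]) :: pvChunksBuf m [] xs
      else pvChunksBuf m (temp ++ [x]) xs

def pvStepA (m : Nat) (st : List (List Int) × List Int) (i : Int) :
    List (List Int) × List Int :=
  let temp := st.2 ++ [i]
  if temp.length ≥ m then (st.1 ++ [temp], ([] : List Int)) else (st.1, temp)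

theorem pvFoldA (m : Nat) (a : List Int) :
    ∀ (acc : List (List Int)) (temp : List Int),
      (let st := a.foldl (pvStepA m) (acc, temp)
       if st.2.length > 0 then st.1 ++ [st.2] else st.1) =
      acc ++ pvChunksBuf m temp a := by
  induction a with
  | nil =>
    intro acc temp
    simp only [List.foldl_nil, pvChunksBuf]
    split <;> simp_all
  | cons x xs ih =>
    intro acc temp
    simp only [List.foldl_cons]
    by_cases h : (temp ++ [x]).length ≥ m
    · rw [show pvStepA m (acc, temp) x = (acc ++ [temp ++ [x]], []) from by
        simp only [pvStepA]; rw [if_pos h]]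
      rw [ih]
      simp only [pvChunksBuf, if_pos h]
      simp
    · rw [show pvStepA m (acc, temp) x = (acc, temp ++ [x]) from by
        simp only [pvStepA]; rw [if_neg h]]
      rw [ih]
      simp only [pvChunksBuf, if_neg h]

theorem pvChunksBuf_eq (m : Nat) (hm : 1 ≤ m) (a : List Int) :
    ∀ (temp : List Int), temp.length < m →
      pvChunksBuf m temp a = pvChunks m (temp ++ a) := by
  induction a with
  | nil =>
    intro temp ht
    simp only [pvChunksBuf, List.append_nil]
    cases temp with
    | nil => simp [pvChunks_nil]
    | cons t ts =>
      simp only [List.length_cons, gt_iff_lt, Nat.succ_pos, if_pos]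
      have h1 : ts.take (m - 1) = ts := List.take_of_length_le (by simp at ht; omega)
      have h2 : ts.drop (m - 1) = [] := List.drop_eq_nil_of_le (by simp at ht; omega)
      rw [pvChunks.eq_def]
      simp [h1, h2, pvChunks_nil]
  | cons x xs ih =>
    intro temp ht
    simp only [pvChunksBuf]
    by_cases h : (temp ++ [x]).length ≥ m
    · have hlen : (temp ++ [x]).length = m := by simp at h ⊢; omega
      rw [if_pos h]
      rw [show temp ++ x :: xs = (temp ++ [x]) ++ xs from by simp]
      rw [pvChunks_cons m hm _ (List.ne_nil_of_length_pos (by simp))]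
      rw [List.take_left' hlen, List.drop_left' hlen]
      rw [ih [] (by simp only [List.length_nil]; omega)]
      simp
    · rw [if_neg h]
      rw [ih (temp ++ [x]) (by simp at h ⊢; omega)]
      simp

theorem pvA_eq_chunks (a : List Int) :
    split_in_parts a = pvChunks (Nat.sqrt a.length) a := by
  cases a with
  | nil => simp [split_in_parts, pvChunks_nil]
  | cons x xs =>
    have hm : 1 ≤ Nat.sqrt (x :: xs).length := by
      rw [Nat.one_le_iff_ne_zero, Ne, Nat.sqrt_eq_zero]
      simp
    have h1 := pvFoldA (Nat.sqrt (x :: xs).length) (x :: xs) [] []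
    have h2 := pvChunksBuf_eq (Nat.sqrt (x :: xs).length) hm (x :: xs) [] (by simpa using hm)
    exact h1.trans (by rw [h2]; simp)

-- B's index map, characterised
theorem pvMap_eq_chunks (m : Nat) (hm : 1 ≤ m) :
    ∀ (N : Nat) (a : List Int), a.length ≤ N * m → N * m < a.length + m →
      (List.range N).map (fun k => (a.drop (m * k)).take m) = pvChunks m a := by
  intro N
  induction N with
  | zero =>
    intro a h1 _
    have : a = [] := List.eq_nil_of_length_eq_zero (by omega)
    simp [this, pvChunks_nil]
  | succ N ih =>
    intro a h1 h2
    have hp : (N + 1) * m = N * m + m := by ring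
    rw [hp] at h1 h2
    have hna : 0 < a.length := by
      have : 0 ≤ N * m := Nat.zero_le _
      omega
    rw [List.range_succ_eq_map, List.map_cons, List.map_map]
    have hh : (fun k => (a.drop (m * k)).take m) ∘ Nat.succ
        = fun k => ((a.drop m).drop (m * k)).take m := by
      funext k
      simp only [Function.comp, List.drop_drop]
      congr 2
      exact (Nat.mul_succ m k).trans (Nat.add_comm _ _)
    rw [hh]
    by_cases hN : N = 0
    · subst hN
      have hd : a.drop m = [] := List.drop_eq_nil_of_le (by simpa using h1)
      rw [pvChunks_cons m hm a (by intro h; simp [h] at hna)]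
      simp [hd, pvChunks_nil]
    · have hmN : m ≤ N * m := Nat.le_mul_of_pos_left m (by omega)
      rw [ih (a.drop m) (by simp; omega) (by simp; omega)]
      rw [pvChunks_cons m hm a (by intro h; simp [h] at hna)]
      simp
  
theorem pvB_eq_chunks (a : List Int) :
    split_in_parts_alt a = pvChunks (Nat.sqrt a.length) a := by
  show (if a.length = 0 then [] else
      (PySem.List.pyRange 0 (a.length : Int) ((Nat.sqrt a.length : Nat) : Int)).map
        (fun i => PySem.List.slice a (some i) (some (i + ((Nat.sqrt a.length : Nat) : Int))))) =
    pvChunks (Nat.sqrt a.length) a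
  by_cases h0 : a.length = 0
  · have ha : a = [] := List.eq_nil_of_length_eq_zero h0
    subst ha
    simp [pvChunks_nil]
  · rw [if_neg h0]
    set n := a.length with hn
    set m := Nat.sqrt n with hmdef
    have hna : 0 < n := by omega
    have hm : 1 ≤ m := by
      rw [hmdef, Nat.one_le_iff_ne_zero, Ne, Nat.sqrt_eq_zero]; omega
    rw [PySem.List.pyRange_of_pos 0 (n : Int) (by exact_mod_cast hm)]
    rw [if_pos (by exact_mod_cast hna)]
    rw [List.map_map]
    set q : Int := (((n : Int)) - 0 + (m : Int) - 1) / (m : Int) with hq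
    have hmne : (m : Int) ≠ 0 := by exact_mod_cast Nat.one_le_iff_ne_zero.mp hm
    have hdm := Int.ediv_add_emod (((n : Int)) - 0 + (m : Int) - 1) (m : Int)
    have hr0 := Int.emod_nonneg (((n : Int)) - 0 + (m : Int) - 1) hmne
    have hrm := Int.emod_lt_of_pos (((n : Int)) - 0 + (m : Int) - 1)
      (b := (m : Int)) (by exact_mod_cast hm)
    rw [← hq] at hdm
    have hle : (n : Int) ≤ (m : Int) * q := by
      set r := (((n : Int)) - 0 + (m : Int) - 1) % (m : Int)
      linarith
    have hlt : (m : Int) * q < (n : Int) + (m : Int) := by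
      set r := (((n : Int)) - 0 + (m : Int) - 1) % (m : Int)
      linarith
    have hq0 : 0 ≤ q := by
      by_contra hneg
      push_neg at hneg
      have hmq : (m : Int) * q ≤ (m : Int) * (-1) := by
        apply mul_le_mul_of_nonneg_left (by omega) (by exact_mod_cast Nat.zero_le m)
      have hn1 : (1 : Int) ≤ (n : Int) := by exact_mod_cast hna
      have hm1 : (1 : Int) ≤ (m : Int) := by exact_mod_cast hm
      linarith
    have hcast : ((q.toNat * m : Nat) : Int) = (m : Int) * q := by
      push_cast [Int.toNat_of_nonneg hq0]; ring
    have h1 : n ≤ q.toNat * m := by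
      have : ((n : Nat) : Int) ≤ ((q.toNat * m : Nat) : Int) := by rw [hcast]; exact hle
      exact_mod_cast this
    have h2 : q.toNat * m < n + m := by
      have : ((q.toNat * m : Nat) : Int) < ((n + m : Nat) : Int) := by
        rw [hcast]; push_cast; exact hlt
      exact_mod_cast this
    rw [← pvMap_eq_chunks m hm q.toNat a h1 h2]
    apply List.map_congr_left
    intro k _
    simp only [Function.comp]
    have hc : (0 : Int) + (m : Int) * (k : Int) = ((m * k : Nat) : Int) := by push_cast; ring
    rw [hc, PySem.List.slice_natCast_add a (m * k) m]

-- ===== VERDICT (by name: the statement is the Claim_ definition above) =====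
theorem split_in_parts_spec : Claim_equal_split_in_parts := by
  intro a _
  unfold Spec_split_in_parts
  rw [pvA_eq_chunks, pvB_eq_chunks]
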